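-- pv_equiv track=rewrite | github.com/joaovpassos/USP-Programs | files/alinhamento.py | gera_gaps
-- ===== SOURCE A (Python) =====
-- GAP = '_'
--
-- def gera_gaps( dna ):
--     ''' ( str ) -> list
--
--     RECEBE uma string `dna` representando uma fita de DNA com os
--     símbolos 'A', 'T', 'C', 'G' e '_' (GAP).
--
--     RETORNA uma lista com todas as variações de dna com um símbolo GAP
--     a mais e sem repetições.
--
--     exemplos:
--     In  [1]: gera_gaps( 'T' )
--     Out [1]: ['_T', 'T_']
--
--     In  [2]: gera_gaps( 'CA' )
--     Out [2]: ['_CA', 'C_A', 'CA_']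
--
--     In  [3]: gera_gaps( 'AT_G')
--     Out [3]: ['_AT_G', 'A_T_G', 'AT__G', 'AT_G_']
--     '''
--     # modifique o código abaixo para conter a sua solução.
--     variacoes = []
--     seq = []
--     for i in range(len(dna)):
--         seq += [dna[i]]
--     seq_muda = seq
--     variacoes += [GAP + dna]
--     for i in range(len(seq_muda)):
--         seq_muda = seq[:]
--         seq_muda[i] += GAP
--         texto =  ''.join(seq_muda)
--         if texto not in variacoes:
--             variacoes += [texto]
--     return variacoes
-- ===== SOURCE B (Python) =====
-- GAP = '_'
--
-- def gera_gaps(dna):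
--     # Insert GAP at every slice position; a position right after an existing
--     # GAP reproduces the previous insertion, so skip it instead of dedup-scanning.
--     return [dna[:i] + GAP + dna[i:]
--             for i in range(len(dna) + 1)
--             if i == 0 or dna[i - 1] != GAP]
-- ===== Notes on version B (the rewrite author's own statement) =====
-- stated objective: simpler
-- what changed: A builds a char list, mutates a copy per position and dedups with a linear membership scan over the result list; B is a single slice-insertion comprehension that emits dna[:i]+GAP+dna[i:] and skips positions directly after an existing gap, so no dedup structure or membership scan exists.
import Mathlib
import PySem

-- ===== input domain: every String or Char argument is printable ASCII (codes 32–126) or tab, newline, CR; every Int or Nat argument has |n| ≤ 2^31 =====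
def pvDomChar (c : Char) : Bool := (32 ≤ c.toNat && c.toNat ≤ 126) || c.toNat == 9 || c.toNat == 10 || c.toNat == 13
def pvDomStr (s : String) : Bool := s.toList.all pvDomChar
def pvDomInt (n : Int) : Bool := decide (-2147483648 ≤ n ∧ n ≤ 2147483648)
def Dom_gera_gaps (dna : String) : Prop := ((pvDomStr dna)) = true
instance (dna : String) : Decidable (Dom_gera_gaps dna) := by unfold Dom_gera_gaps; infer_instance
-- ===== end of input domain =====

-- B replaces A's copy-and-mutate pass with membership dedup by a single slice-insertion
-- comprehension that skips positions right after an existing gap (objective: simpler).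

-- ===== PORT A =====
-- A's python strings of seq/seq_muda are modelled as List Char; the final list keeps String.
def gera_gaps (dna : String) : List String :=
  let seq : List (List Char) :=
    (PySem.List.pyRange 0 (PySem.Str.len dna) 1).foldl
      (fun acc i => acc ++ [(PySem.Str.pyGet? dna i).elim [] (fun c => [c])]) []
  let variacoes : List String := [String.ofList ('_' :: dna.toList)]
  (PySem.List.pyRange 0 (seq.length : Int) 1).foldl
    (fun vs i =>
      let seq_muda := seq.set i.toNat (seq.getD i.toNat [] ++ ['_'])
      let texto := String.ofList (PySem.Chars.join [] seq_muda)
      if texto ∈ vs then vs else vs ++ [texto]) variacoes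

-- ===== PORT B =====
def gera_gaps_alt (dna : String) : List String :=
  (PySem.List.pyRange 0 (PySem.Str.len dna + 1) 1).filterMap (fun i =>
    if i == 0 || !(PySem.Str.pyGet? dna (i - 1) == some '_') then
      some (String.ofList (PySem.Chars.slice dna.toList none (some i) ++
            '_' :: PySem.Chars.slice dna.toList (some i) none))
    else none)

-- ===== PRECONDITION & SPEC =====
def Spec_gera_gaps (dna : String) (out : List String) : Prop := out = gera_gaps_alt dna
instance (dna : String) (out : List String) : Decidable (Spec_gera_gaps dna out) := by unfold Spec_gera_gaps; infer_instance

-- ===== CLAIM (what is proved, stated in full; the proofs are below) =====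
def Claim_equal_gera_gaps : Prop := ∀ (dna : String), Dom_gera_gaps dna → Spec_gera_gaps dna (gera_gaps dna)

-- ===== LEMMAS AND PROOFS =====

-- insertion of a gap at position i
def pvIns (l : List Char) (i : Nat) : List Char := l.take i ++ '_' :: l.drop i

def pvKeep (l : List Char) (i : Nat) : Bool := i == 0 || !(l[i-1]? == some '_')

def pvB (l : List Char) : List String :=
  ((List.range (l.length + 1)).filter (pvKeep l)).map (fun i => String.ofList (pvIns l i))

def pvStep (l : List Char) (vs : List String) (k : Nat) : List String :=
  if String.ofList (pvIns l (k+1)) ∈ vs then vs else vs ++ [String.ofList (pvIns l (k+1))]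

def pvA (l : List Char) : List String :=
  (List.range l.length).foldl (pvStep l) [String.ofList ('_' :: l)]

theorem pvOfList_inj {a b : List Char} (h : String.ofList a = String.ofList b) : a = b := by
  have := congrArg String.toList h; simpa using this

theorem pvJoin_nil (parts : List (List Char)) : PySem.Chars.join [] parts = parts.flatten := by
  simp only [PySem.Chars.join]
  unfold List.intercalate
  induction parts with
  | nil => rfl
  | cons a t ih => cases t <;> simp_all [List.intersperse]

theorem pvFilterMap_if {α β : Type} (xs : List α) (p : α → Bool) (f : α → β) :
    (xs.filterMap fun x => if p x then some (f x) else none) = (xs.filter p).map f := by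
  induction xs with
  | nil => rfl
  | cons a t ih => by_cases h : p a <;> simp [h, ih]

theorem pvIns_zero (l : List Char) : pvIns l 0 = '_' :: l := by simp [pvIns]

-- a gap inserted right after an existing gap repeats the previous insertion
theorem pvIns_gap {l : List Char} {m : Nat} (hm : m < l.length) (hc : l[m] = '_') :
    pvIns l (m+1) = pvIns l m := by
  unfold pvIns
  rw [List.take_add_one, List.drop_eq_getElem_cons hm]
  simp [hm, hc]

-- a gap inserted after a NON-gap character differs from every earlier insertion
theorem pvIns_ne {l : List Char} {p m : Nat} (hp : p ≤ m) (hm : m < l.length)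
    (hc : l[m] ≠ '_') : pvIns l p ≠ pvIns l (m+1) := by
  intro he
  have h1 : (pvIns l p)[m+1]? = some l[m] := by
    have hlt : (l.take p).length = p := List.length_take_of_le (by omega)
    unfold pvIns
    rw [List.getElem?_append_right (by rw [hlt]; omega)]
    rw [hlt, show m + 1 - p = (m - p) + 1 from by omega, List.getElem?_cons_succ,
        List.getElem?_drop, show p + (m - p) = m from by omega, List.getElem?_eq_getElem hm]
  have h2 : (pvIns l (m+1))[m+1]? = some '_' := by
    have hlt : (l.take (m+1)).length = m+1 := List.length_take_of_le (by omega)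
    unfold pvIns
    rw [List.getElem?_append_right (by rw [hlt])]
    rw [hlt, Nat.sub_self, List.getElem?_cons_zero]
  rw [he, h2] at h1
  exact hc (Option.some.inj h1).symm

theorem pvKeep_zero (l : List Char) : pvKeep l 0 = true := by simp [pvKeep]

theorem pvKeep_succ {l : List Char} {m : Nat} (hm : m < l.length) :
    pvKeep l (m+1) = !(l[m] == '_') := by
  simp [pvKeep, List.getElem?_eq_getElem hm]

-- loop invariant for A's dedup loop
theorem pvInv (l : List Char) : ∀ m, m ≤ l.length →
    (List.range m).foldl (pvStep l) [String.ofList ('_' :: l)] =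
      ((List.range (m+1)).filter (pvKeep l)).map (fun i => String.ofList (pvIns l i)) ∧
    ∀ p ≤ m, String.ofList (pvIns l p) ∈
      (List.range m).foldl (pvStep l) [String.ofList ('_' :: l)] := by
  intro m
  induction m with
  | zero =>
    intro _
    constructor
    · simp [List.range_succ, pvKeep_zero, pvIns_zero]
    · intro p hp
      interval_cases p
      simp [pvIns_zero]
  | succ m ih =>
    intro hle
    have hm : m < l.length := by omega
    obtain ⟨ih1, ih2⟩ := ih (by omega)
    rw [List.range_succ, List.foldl_append]
    simp only [List.foldl_cons, List.foldl_nil]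
    by_cases hc : l[m] = '_'
    · -- duplicate: skipped by A's membership test and by B's filter
      have he : pvIns l (m+1) = pvIns l m := pvIns_gap hm hc
      have hmem : String.ofList (pvIns l (m+1)) ∈
          (List.range m).foldl (pvStep l) [String.ofList ('_' :: l)] := by
        rw [he]; exact ih2 m le_rfl
      rw [pvStep, if_pos hmem]
      constructor
      · rw [ih1, List.range_succ (n := m+1), List.filter_append]
        simp [pvKeep_succ hm, hc]
      · intro p hp
        rcases Nat.lt_or_ge p (m+1) with h | h
        · exact ih2 p (by omega)
        · have : p = m + 1 := by omega
          subst this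
          rw [he]; exact ih2 m le_rfl
    · -- new string: appended by A, kept by B's filter
      have hnm : String.ofList (pvIns l (m+1)) ∉
          (List.range m).foldl (pvStep l) [String.ofList ('_' :: l)] := by
        rw [ih1]
        intro hmem
        obtain ⟨p, hpmem, hpe⟩ := List.mem_map.mp hmem
        have hpr : p < m + 1 := List.mem_range.mp (List.mem_filter.mp hpmem).1
        exact pvIns_ne (p := p) (Nat.lt_succ_iff.mp hpr) hm hc (pvOfList_inj hpe)
      rw [pvStep, if_neg hnm]
      constructor
      · rw [ih1, List.range_succ (n := m+1), List.filter_append]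
        simp [pvKeep_succ hm, hc]
      · intro p hp
        rcases Nat.lt_or_ge p (m+1) with h | h
        · exact List.mem_append_left _ (ih2 p (by omega))
        · have : p = m + 1 := by omega
          subst this
          exact List.mem_append_right _ (by simp)

theorem pvA_eq_pvB (l : List Char) : pvA l = pvB l :=
  (pvInv l l.length le_rfl).1

-- the string A builds at loop index k is the gap inserted at slice position k+1
theorem pvText (l : List Char) (k : Nat) (hk : k < l.length) :
    PySem.Chars.join []
      ((l.map (fun c => [c])).set k ((l.map (fun c => [c])).getD k [] ++ ['_'])) =
    pvIns l (k+1) := by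
  rw [pvJoin_nil]
  have hget : (l.map (fun c => [c])).getD k [] = [l[k]] := by
    simp [List.getD, List.getElem?_eq_getElem (by simpa using hk)]
  rw [hget, List.set_eq_take_append_cons_drop,
      if_pos (by simpa using hk)]
  rw [← List.map_take, ← List.map_drop]
  simp only [List.flatten_append, List.flatten_cons]
  have hflat : ∀ t : List Char, (t.map (fun c => [c])).flatten = t := by
    intro t; induction t <;> simp_all
  rw [hflat, hflat]
  unfold pvIns
  have ht : l.take (k+1) = l.take k ++ [l[k]] := by
    rw [List.take_add_one, List.getElem?_eq_getElem hk]; rfl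
  conv_rhs => rw [ht, List.append_assoc]
  rfl

-- port A computes pvA of the character list
theorem gera_gaps_eq_pvA (dna : String) : gera_gaps dna = pvA dna.toList := by
  unfold gera_gaps
  set l := dna.toList with hl
  have hseq : (PySem.List.pyRange 0 (PySem.Str.len dna) 1).foldl
      (fun acc i => acc ++ [(PySem.Str.pyGet? dna i).elim [] (fun c => [c])]) []
      = l.map (fun c => [c]) := by
    rw [PySem.List.foldl_append_singleton_eq_map]
    rw [show PySem.Str.len dna = (l.length : Int) by simp [hl]]
    rw [PySem.List.pyRange_one]
    simp only [List.map_map, List.nil_append]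
    apply List.ext_getElem
    · simp
    · intro k h1 h2
      simp only [List.getElem_map, List.getElem_range, Function.comp_apply]
      have h3 : (0 : Int) + (k : Nat) = ((k : Nat) : Int) := by omega
      rw [h3, show PySem.Str.pyGet? dna ((k : Nat) : Int) = l[k]? from by simp [hl]]
      rw [List.getElem?_eq_getElem (by simpa using h2)]
      rfl
  rw [hseq]
  simp only [List.length_map]
  rw [PySem.List.pyRange_one]
  simp only [Int.sub_zero, Int.toNat_natCast, List.foldl_map]
  unfold pvA
  apply PySem.List.foldl_congr_mem
  intro vs k hk
  have hk' : k < l.length := List.mem_range.mp hk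
  have h3 : (0 : Int) + (k : Nat) = ((k : Nat) : Int) := by omega
  simp only [h3, Int.toNat_natCast]
  rw [pvText l k hk']
  rfl

-- port B computes pvB of the character list
theorem gera_gaps_alt_eq_pvB (dna : String) : gera_gaps_alt dna = pvB dna.toList := by
  unfold gera_gaps_alt
  set l := dna.toList with hl
  rw [show PySem.Str.len dna + 1 = ((l.length + 1 : Nat) : Int) by simp [hl]]
  rw [PySem.List.pyRange_one]
  simp only [Int.sub_zero, Int.toNat_natCast, List.filterMap_map]
  unfold pvB
  rw [← pvFilterMap_if]
  apply List.filterMap_congr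
  intro k hk
  have h3 : (0 : Int) + (k : Nat) = ((k : Nat) : Int) := by omega
  simp only [Function.comp_apply, h3]
  have hsl1 : PySem.Chars.slice l none (some ((k : Nat) : Int)) = l.take k := by
    rw [PySem.Chars.slice_eq_listSlice, PySem.List.slice_to _ (by positivity)]
    simp
  have hsl2 : PySem.Chars.slice l (some ((k : Nat) : Int)) none = l.drop k := by
    rw [PySem.Chars.slice_eq_listSlice, PySem.List.slice_from _ (by positivity)]
    simp
  rw [hsl1, hsl2]
  cases k with
  | zero => simp [pvKeep, pvIns]
  | succ m =>
    have h4 : ((m + 1 : Nat) : Int) - 1 = ((m : Nat) : Int) := by omega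
    rw [h4, show PySem.Str.pyGet? dna ((m : Nat) : Int) = l[m]? from by simp [hl]]
    have h5 : ((m : Int) + 1 ≠ 0) := by omega
    by_cases hc : l[m]? = some '_' <;> simp [pvKeep, pvIns, hc, h5]

theorem gera_gaps_spec : Claim_equal_gera_gaps := by
  intro dna _
  unfold Spec_gera_gaps
  rw [gera_gaps_eq_pvA, gera_gaps_alt_eq_pvB, pvA_eq_pvB]
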